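-- pv_equiv track=rewrite | github.com/cristinaauramaria/-Artificial-Intelligence | Subalg.py | pb10
-- ===== SOURCE A (Python) =====
-- def pb10(matrice):
--      max=0
--      indice=-1
--      for x in range(0,len(matrice)-1):
--          suma=sum(matrice[x])
--          if suma>max:
--              max=suma
--              indice=x
--      return indice
-- ===== SOURCE B (Python) =====
-- def pb10(matrice):
--     sums = [sum(r) for r in matrice[:-1]]
--     if not sums:
--         return -1
--     m = max(sums)
--     return sums.index(m) if m > 0 else -1
-- ===== Notes on version B (the rewrite author's own statement) =====
-- stated objective: simpler
-- what changed: Replaces A's single running-max loop with a build-table-then-argmax decomposition: compute the row sums of matrice[:-1] once, then take max() and .index() with a >0 guard, reproducing A's first-occurrence tie-breaking and its -1 result when no sum is positive.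
import Mathlib
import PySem

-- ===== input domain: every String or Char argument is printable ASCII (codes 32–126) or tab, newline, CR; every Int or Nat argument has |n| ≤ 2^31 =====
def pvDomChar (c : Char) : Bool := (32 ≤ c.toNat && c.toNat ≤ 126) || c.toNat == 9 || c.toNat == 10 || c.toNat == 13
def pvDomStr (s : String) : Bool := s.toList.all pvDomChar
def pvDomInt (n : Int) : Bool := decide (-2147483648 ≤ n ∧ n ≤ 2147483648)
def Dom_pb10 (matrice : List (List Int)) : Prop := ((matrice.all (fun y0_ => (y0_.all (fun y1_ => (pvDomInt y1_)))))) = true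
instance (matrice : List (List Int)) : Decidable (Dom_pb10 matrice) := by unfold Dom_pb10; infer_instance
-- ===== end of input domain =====

-- B replaces A's running-max loop by building the list of row sums of matrice[:-1] first
-- and then taking max/.index (with A's >0 guard) in a second pass; objective: simpler.


-- ===== PORT A =====
-- for x in range(0, len(matrice)-1): running max of sum(matrice[x]) starting at 0, index -1
def pb10 (matrice : List (List Int)) : Int :=
  let st := (PySem.List.pyRange 0 ((matrice.length : Int) - 1) 1).foldl
    (fun (s : Int × Int) x =>
      let suma := (PySem.List.pyGetD matrice x []).foldl (· + ·) 0
      if suma > s.1 then (suma, x) else s) (0, -1)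
  st.2

-- ===== PORT B =====
def pb10_alt (matrice : List (List Int)) : Int :=
  let sums := (PySem.List.slice matrice none (some (-1))).map (fun r => r.foldl (· + ·) 0)
  if sums = [] then -1
  else
    let m := (PySem.List.max? sums (fun v => v)).getD 0
    if m > 0 then ((PySem.List.index? sums m).getD 0 : Nat) else -1

-- ===== PRECONDITION & SPEC =====
def Spec_pb10 (matrice : List (List Int)) (out : Int) : Prop := out = pb10_alt matrice
instance (matrice : List (List Int)) (out : Int) : Decidable (Spec_pb10 matrice out) := by unfold Spec_pb10; infer_instance

-- ===== CLAIM (what is proved, stated in full; the proofs are below) =====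
def Claim_equal_pb10 : Prop := ∀ (matrice : List (List Int)), Dom_pb10 matrice → Spec_pb10 matrice (pb10 matrice)

-- ===== LEMMAS AND PROOFS =====

/-- A's loop body, abstracted over the list of row sums (index carried as a Nat). -/
def pvAux (s : Int × Int) (k : Nat) : List Int → Int × Int
  | [] => s
  | v :: vs => pvAux (if v > s.1 then (v, (k : Int)) else s) (k + 1) vs

theorem pvAux_append (s : Int × Int) (k : Nat) (xs : List Int) (v : Int) :
    pvAux s k (xs ++ [v]) =
      (let s' := pvAux s k xs; if v > s'.1 then (v, ((k + xs.length : Nat) : Int)) else s') := by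
  induction xs generalizing s k with
  | nil => simp [pvAux]
  | cons x xs ih => simp [pvAux, ih]; ring_nf

theorem pvFoldlMax (vs : List Int) (a b : Int) :
    vs.foldl max (max a b) = max a (vs.foldl max b) := by
  induction vs generalizing b with
  | nil => simp
  | cons c vs ih => simp only [List.foldl_cons, max_assoc, ih]

/-- Characterisation of A's running-max loop via first-max and first-index. -/
theorem pvAux_cons (s : Int × Int) (k : Nat) (v : Int) (vs : List Int) :
    pvAux s k (v :: vs) = pvAux (if v > s.1 then (v, (k : Int)) else s) (k + 1) vs := rfl

theorem pvAux_spec (vs : List Int) (m0 i0 : Int) (k : Nat) :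
    pvAux (m0, i0) k vs =
      match PySem.List.max? vs (fun v => v) with
      | none => (m0, i0)
      | some M =>
          if M > m0 then (M, ((k + (PySem.List.index? vs M).getD 0 : Nat) : Int)) else (m0, i0) := by
  induction vs generalizing m0 i0 k with
  | nil => simp [pvAux, PySem.List.max?]
  | cons v vs ih =>
    rw [PySem.List.max?_id_cons]
    cases vs with
    | nil =>
      by_cases hv : v > m0 <;>
        simp [pvAux, hv]
    | cons w ws =>
      have hfold : (w :: ws).foldl max v = max v (ws.foldl max w) := by
        simpa using pvFoldlMax ws v w
      set M' := ws.foldl max w with hM'def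
      have hmaxw : PySem.List.max? (w :: ws) (fun v => v) = some M' := by
        simpa [hM'def] using PySem.List.max?_id_cons w ws
      have hmem : M' ∈ w :: ws := PySem.List.max?_mem hmaxw
      obtain ⟨idx, hidx⟩ : ∃ idx, PySem.List.index? (w :: ws) M' = some idx :=
        Option.isSome_iff_exists.mp ((PySem.List.index?_isSome_iff _ _).mpr hmem)
      rw [pvAux_cons]
      simp only [List.foldl_cons] at hfold ⊢
      rw [hfold]
      by_cases hv : v > m0
      · rw [if_pos hv, ih, hmaxw]
        dsimp only
        by_cases hMv : M' > v
        · have hmax : max v M' = M' := max_eq_right (le_of_lt hMv)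
          have hne : v ≠ M' := ne_of_lt hMv
          rw [hmax, if_pos hMv, if_pos (lt_trans hv hMv),
            PySem.List.index?_cons_of_ne _ hne, hidx]
          simp only [Option.map_some, Option.getD_some, Prod.mk.injEq, true_and]
          congr 1
          omega
        · have hmax : max v M' = v := max_eq_left (not_lt.mp hMv)
          rw [hmax, if_neg hMv, if_pos hv, PySem.List.index?_cons_self]
          simp
      · rw [if_neg hv, ih, hmaxw]
        dsimp only
        by_cases hMm : M' > m0
        · have hvm : v ≤ m0 := not_lt.mp hv
          have hvM : v < M' := lt_of_le_of_lt hvm hMm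
          have hmax : max v M' = M' := max_eq_right (le_of_lt hvM)
          have hne : v ≠ M' := ne_of_lt hvM
          rw [hmax, if_pos hMm, if_pos hMm, PySem.List.index?_cons_of_ne _ hne, hidx]
          simp only [Option.map_some, Option.getD_some, Prod.mk.injEq, true_and]
          congr 1
          omega
        · have hmax : max v M' ≤ m0 := max_le (not_lt.mp hv) (not_lt.mp hMm)
          rw [if_neg hMm, if_neg (not_lt.mpr hmax)]

/-- A's range-indexed fold equals pvAux over the sums of the first m rows. -/
theorem pvFold_eq (l : List (List Int)) (m : Nat) (h : m ≤ l.length) (s : Int × Int) :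
    (List.range m).foldl
      (fun (s : Int × Int) k =>
        let suma := (PySem.List.pyGetD l ((k : Nat) : Int) []).foldl (· + ·) 0
        if suma > s.1 then (suma, ((k : Nat) : Int)) else s) s
    = pvAux s 0 ((l.take m).map (fun r => r.foldl (· + ·) 0)) := by
  induction m with
  | zero => simp [pvAux]
  | succ m ih =>
    have hm : m < l.length := by omega
    have hget : PySem.List.pyGetD l ((m : Nat) : Int) [] = l[m] := by
      rw [PySem.List.pyGetD_eq_getElem l [] (Int.natCast_nonneg m) (by exact_mod_cast hm)]
      simp
    have htake : l.take (m + 1) = l.take m ++ [l[m]] := by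
      rw [List.take_add_one]; simp [List.getElem?_eq_getElem hm]
    rw [List.range_succ, List.foldl_append, ih (by omega), htake]
    simp only [List.map_append, List.map_cons, List.map_nil]
    rw [pvAux_append]
    simp [List.getElem?_eq_getElem hm, Nat.min_eq_left (le_of_lt hm)]

-- ===== VERDICT (by name: the statement is the Claim_ definition above) =====
theorem pb10_spec : Claim_equal_pb10 := by
  intro matrice _
  unfold Spec_pb10 pb10 pb10_alt
  rw [PySem.List.slice_to_neg_one]
  have hrange : PySem.List.pyRange 0 ((matrice.length : Int) - 1) 1
      = (List.range (matrice.length - 1)).map (fun k => ((k : Nat) : Int)) := by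
    have h1 : ((matrice.length : Int) - 1 - 0).toNat = matrice.length - 1 := by omega
    rw [PySem.List.pyRange_one, h1]
    simp
  rw [hrange, List.foldl_map]
  have := pvFold_eq matrice (matrice.length - 1) (by omega) (0, -1)
  simp only [this, List.dropLast_eq_take]
  rw [pvAux_spec]
  set sums := (matrice.take (matrice.length - 1)).map (fun r => r.foldl (· + ·) 0) with hs
  cases hmax : PySem.List.max? sums (fun v => v) with
  | none =>
    have : sums = [] := (PySem.List.max?_eq_none_iff _ _).mp hmax
    simp [this]
  | some M =>
    have hne : sums ≠ [] := by
      intro h; rw [h] at hmax; simp [PySem.List.max?] at hmax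
    have hmem : M ∈ sums := PySem.List.max?_mem hmax
    obtain ⟨idx, hidx⟩ : ∃ idx, PySem.List.index? sums M = some idx :=
      Option.isSome_iff_exists.mp ((PySem.List.index?_isSome_iff _ _).mpr hmem)
    simp [hne]
    by_cases hM : M > 0 <;> simp [hM]
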